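-- pv_equiv track=rewrite | github.com/vthakore23/healthcare-stock-analyzer | medequity_utils/natural_language_query.py | _extract_summary_from_gpt4
-- ===== SOURCE A (Python) =====
-- def _extract_summary_from_gpt4(analysis: str) -> str:
--     """Extract summary from GPT-4 analysis"""
--     lines = analysis.split('\n')
--     for i, line in enumerate(lines):
--         if 'summary' in line.lower() or i == 0:
--             # Find the next non-empty line(s) after summary header
--             summary_lines = []
--             for j in range(i + 1, min(i + 4, len(lines))):
--                 if lines[j].strip() and not lines[j].strip().startswith(('1.', '2.', '3.', '4.', '-', '•')):
--                     summary_lines.append(lines[j].strip())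
--                 elif summary_lines:  # Stop if we hit a list after collecting summary
--                     break
--             return ' '.join(summary_lines)
--
--     # Fallback: return first few sentences
--     sentences = analysis.split('.')[:3]
--     return '. '.join(sentences) + '.'
-- ===== SOURCE B (Python) =====
-- def _extract_summary_from_gpt4(analysis: str) -> str:
--     # Two-stage dropwhile/takewhile: strip the (at most 3) candidate lines,
--     # skip the leading disqualified ones, then take the maximal run of good lines.
--     def good(s):
--         return bool(s) and not s.startswith(('1.', '2.', '3.', '4.', '-', '•'))
--     stripped = [line.strip() for line in analysis.split('\n')[1:4]]
--     while stripped and not good(stripped[0]):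
--         stripped = stripped[1:]
--     summary = []
--     while stripped and good(stripped[0]):
--         summary.append(stripped[0])
--         stripped = stripped[1:]
--     return ' '.join(summary)
-- ===== Notes on version B (the rewrite author's own statement) =====
-- stated objective: alternative
-- what changed: A's enumerate loop (which always returns at i==0) with its collect-and-break-after-collection accumulator is replaced by a staged dropwhile/takewhile decomposition: strip lines[1:4], skip the leading disqualified lines, then take the maximal run of qualifying lines; the break-after-collection rule is never written, it falls out of take-the-first-run.
import Mathlib
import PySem

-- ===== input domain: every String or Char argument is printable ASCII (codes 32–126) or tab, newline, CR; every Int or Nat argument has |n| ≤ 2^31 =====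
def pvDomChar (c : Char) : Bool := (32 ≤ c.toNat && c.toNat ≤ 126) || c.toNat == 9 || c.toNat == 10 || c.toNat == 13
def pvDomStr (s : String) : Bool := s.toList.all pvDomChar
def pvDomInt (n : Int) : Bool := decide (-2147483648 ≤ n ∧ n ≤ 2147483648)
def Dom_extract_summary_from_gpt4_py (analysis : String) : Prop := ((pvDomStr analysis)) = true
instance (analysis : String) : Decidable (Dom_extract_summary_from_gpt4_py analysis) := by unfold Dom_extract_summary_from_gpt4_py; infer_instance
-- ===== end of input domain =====

-- B replaces A's dead outer loop + collect/break accumulator by a staged dropwhile/takewhile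
-- over the stripped lines[1:4] (objective: alternative decomposition, same cost).

-- ===== PORT A =====
def pvAStarts (s : String) : Bool :=
  PySem.Str.startswith s "1." || PySem.Str.startswith s "2." || PySem.Str.startswith s "3." ||
  PySem.Str.startswith s "4." || PySem.Str.startswith s "-" || PySem.Str.startswith s "•"

-- inner loop: for j in range(i+1, min(i+4, len(lines))) with append/break
def pvAInner (lines : List String) (js : List Int) (acc : List String) : List String :=
  match js with
  | [] => acc
  | j :: rest =>
    let s := PySem.Str.strip ((PySem.List.pyGet? lines j).getD "")  -- j always in range here
    if s != "" && !pvAStarts s then pvAInner lines rest (acc ++ [s])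
    else if acc ≠ [] then acc
    else pvAInner lines rest acc

-- outer loop: for i, line in enumerate(lines): if 'summary' in line.lower() or i == 0: return …
def pvAOuter (lines : List String) : List (Int × String) → Option String
  | [] => none
  | (i, line) :: rest =>
    if PySem.Str.isIn "summary" (PySem.Str.lower line) || i == 0 then
      some (PySem.Str.join " "
        (pvAInner lines (PySem.List.pyRange (i + 1) (min (i + 4) (lines.length : Int))) []))
    else pvAOuter lines rest

def extract_summary_from_gpt4_py (analysis : String) : String :=
  let lines := (PySem.Str.split? analysis "\n").getD []  -- sep ≠ "" so split? is some
  match pvAOuter lines (PySem.List.enumerate lines) with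
  | some r => r
  | none =>
    -- fallback: '. '.join(analysis.split('.')[:3]) + '.'
    let sentences := PySem.List.slice ((PySem.Str.split? analysis ".").getD []) none (some 3)
    PySem.Str.join ". " sentences ++ "."

-- ===== PORT B =====
def pvGood (s : String) : Bool :=
  s != "" && !(["1.", "2.", "3.", "4.", "-", "•"].any (fun p => PySem.Str.startswith s p))

-- first while loop: drop leading disqualified stripped lines
def pvDropB : List String → List String
  | [] => []
  | s :: rest => if !pvGood s then pvDropB rest else s :: rest

-- second while loop: collect the maximal run of good lines
def pvTakeB (summary : List String) : List String → List String
  | [] => summary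
  | s :: rest => if pvGood s then pvTakeB (summary ++ [s]) rest else summary

def extract_summary_from_gpt4_py_alt (analysis : String) : String :=
  let stripped :=
    (PySem.List.slice ((PySem.Str.split? analysis "\n").getD []) (some 1) (some 4)).map
      PySem.Str.strip
  PySem.Str.join " " (pvTakeB [] (pvDropB stripped))

-- ===== PRECONDITION & SPEC =====
def Spec_extract_summary_from_gpt4_py (analysis : String) (out : String) : Prop := out = extract_summary_from_gpt4_py_alt analysis
instance (analysis : String) (out : String) : Decidable (Spec_extract_summary_from_gpt4_py analysis out) := by unfold Spec_extract_summary_from_gpt4_py; infer_instance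

-- ===== CLAIM (what is proved, stated in full; the proofs are below) =====
def Claim_equal_extract_summary_from_gpt4_py : Prop := ∀ (analysis : String), Dom_extract_summary_from_gpt4_py analysis → Spec_extract_summary_from_gpt4_py analysis (extract_summary_from_gpt4_py analysis)

-- ===== LEMMAS AND PROOFS =====

-- A's branch condition equals B's `good`
lemma pvACond (s : String) : (s != "" && !pvAStarts s) = pvGood s := by
  simp [pvAStarts, pvGood, List.any, Bool.or_assoc]

-- splitOn.go never returns []
lemma pvGo_ne_nil (sep : List Char) : ∀ fuel l cur acc, PySem.Chars.splitOn.go sep fuel l cur acc ≠ [] := by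
  intro fuel
  induction fuel with
  | zero => intro l cur acc; simp [PySem.Chars.splitOn.go]
  | succ n ih =>
    intro l cur acc
    cases l with
    | nil => simp [PySem.Chars.splitOn.go]
    | cons c rest =>
      rw [PySem.Chars.splitOn.go]
      split_ifs with h1
      · exact ih _ _ _
      · exact ih _ _ _

lemma pvSplit_nl (analysis : String) :
    ∃ x xs, (PySem.Str.split? analysis "\n").getD [] = x :: xs := by
  have h : PySem.Str.split? analysis "\n"
      = some (List.map String.ofList (PySem.Chars.splitOn analysis.toList ['\n'])) := by
    simp [PySem.Str.split?, PySem.Chars.split?]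
  have hne : PySem.Chars.splitOn analysis.toList ['\n'] ≠ [] :=
    pvGo_ne_nil _ _ _ _ _
  rw [h]
  cases hsp : PySem.Chars.splitOn analysis.toList ['\n'] with
  | nil => exact absurd hsp hne
  | cons y ys => exact ⟨String.ofList y, ys.map String.ofList, by simp⟩

-- the core: A's inner loop starting at index 1 equals drop-then-take on the stripped slice
lemma pvInner_eq (L : List String) :
    pvAInner L (PySem.List.pyRange 1 (min 4 (L.length : Int))) []
      = pvTakeB [] (pvDropB ((PySem.List.slice L (some 1) (some 4)).map PySem.Str.strip)) := by
  match L with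
  | [] => rfl
  | [a] => rfl
  | [a, b] =>
    have hr : PySem.List.pyRange 1 (min 4 (([a, b].length : Int))) = [1] := by
      rw [show (([a, b].length : Int)) = 2 by simp]; decide
    rw [hr]
    by_cases hb : pvGood (PySem.Str.strip b) = true <;>
      simp [pvAInner, pvDropB, pvTakeB, pvACond, hb, PySem.List.pyGet?, PySem.List.pyIdx?,
        PySem.List.slice]
  | [a, b, c] =>
    have hr : PySem.List.pyRange 1 (min 4 (([a, b, c].length : Int))) = [1, 2] := by
      rw [show (([a, b, c].length : Int)) = 3 by simp]; decide
    rw [hr]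
    by_cases hb : pvGood (PySem.Str.strip b) = true <;>
    by_cases hc : pvGood (PySem.Str.strip c) = true <;>
      simp [pvAInner, pvDropB, pvTakeB, pvACond, hb, hc, PySem.List.pyGet?, PySem.List.pyIdx?,
        PySem.List.slice]
  | a :: b :: c :: d :: t =>
    have hmin : min 4 ((a :: b :: c :: d :: t).length : Int) = 4 := by
      simp; omega
    rw [hmin]
    have hr : PySem.List.pyRange 1 4 = [1, 2, 3] := by decide
    rw [hr]
    have hsl : PySem.List.slice (a :: b :: c :: d :: t) (some 1) (some 4) = [b, c, d] := by
      simp [PySem.List.slice, PySem.List.clampIdx]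
    rw [hsl]
    have g1 : PySem.List.pyGet? (a :: b :: c :: d :: t) 1 = some b := by
      rw [show (1 : Int) = ((1 : Nat) : Int) by rfl, PySem.List.pyGet?_natCast]; rfl
    have g2 : PySem.List.pyGet? (a :: b :: c :: d :: t) 2 = some c := by
      rw [show (2 : Int) = ((2 : Nat) : Int) by rfl, PySem.List.pyGet?_natCast]; rfl
    have g3 : PySem.List.pyGet? (a :: b :: c :: d :: t) 3 = some d := by
      rw [show (3 : Int) = ((3 : Nat) : Int) by rfl, PySem.List.pyGet?_natCast]; rfl
    by_cases hb : pvGood (PySem.Str.strip b) = true <;>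
    by_cases hc : pvGood (PySem.Str.strip c) = true <;>
    by_cases hd : pvGood (PySem.Str.strip d) = true <;>
      simp [pvAInner, pvDropB, pvTakeB, pvACond, hb, hc, hd, g1, g2, g3]

-- ===== VERDICT (by name: the statement is the Claim_ definition above) =====
theorem extract_summary_from_gpt4_py_spec : Claim_equal_extract_summary_from_gpt4_py := by
  intro analysis _
  unfold Spec_extract_summary_from_gpt4_py extract_summary_from_gpt4_py extract_summary_from_gpt4_py_alt
  obtain ⟨x, xs, hL⟩ := pvSplit_nl analysis
  rw [hL]
  have key : pvAOuter (x :: xs) (PySem.List.enumerate (x :: xs))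
      = some (PySem.Str.join " "
          (pvTakeB [] (pvDropB ((PySem.List.slice (x :: xs) (some 1) (some 4)).map
            PySem.Str.strip)))) := by
    have henum : PySem.List.enumerate (x :: xs) = (0, x) :: PySem.List.enumerate xs 1 := by
      simp [PySem.List.enumerate]
    rw [henum]
    simp only [pvAOuter]
    rw [if_pos (by simp)]
    have h2 := pvInner_eq (x :: xs)
    simp only [zero_add] at h2 ⊢
    rw [h2]
  simp only [key]
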